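-- pv_equiv track=rewrite | github.com/toBetterMans/spider | 爬虫代码-天眼查/tyc0510/test/graph.py | gen_rsid
-- ===== SOURCE A (Python) =====
-- ne = ['2633141825201321121345332721524273528936811101916293117022304236',
--       '1831735156281312241132340102520529171363214283321272634162219930',
--       '2332353860219720155312141629130102234183691124281413251227261733',
--       '2592811262018293062732141927100364232411333831161535317211222534',
--       '9715232833130331019112512913172124126035262343627321642220185148',
--       '3316362031032192529235212215274341412306269813312817111724201835',
--       '3293412148301016132183119242311021281920736172527353261533526224',
--       '3236623313013201625221912357142415851018341117262721294332103928',
--       '2619332514511302724163415617234183291312001227928218353622321031',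
--       '3111952725113022716818421512203433241091723133635282932601432216']
--
-- _0x4fec = [
--     'f9D1x1Z2o1U2f5A1a1P1i7R1u2S1m1F1',
--     'o2A1x2F1u5~j1Y2z3!p2~r3G2m8S1c1',
--     'i3E5o1~d2!y2H1e2F1b6`g4v7',
--     'p1`t7D3x5#w2~l2Z1v4Y1k4M1n1',
--     'C2e3P1r7!s6U2n2~p5X1e3#',
--     'g4`b6W1x4R1r4#!u5!#D1f2',
--     '!z4U1f4`f2R2o3!l4I1v6F1h2F1x2!',
--     'b2~u9h2K1l3X2y9#B4t1',
--     't5H1s7D1o2#p2#z1Q3v2`j6',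
--     'r1#u5#f1Z2w7!r7#j3S1']
--
-- def gen_rsid(tid):
--     r = str(ord(tid[0:1]))
--     r = r[1] if len(r) > 1 else r
--
--     u = 0
--     o = _0x4fec[int(r)]
--     i = ne[int(r)]
--     a = []
--     s = 0
--     while u < len(o):
--         if not ("`" != o[u] and "!" != o[u] and "~" != o[u]):
--             a.append(i[s:(s + 1)])
--             s += 1
--
--         if "#" == o[u]:
--             a.append(i[s:(s + 1)])
--             a.append(i[(s + 1):(s + 3)])
--             a.append(i[(s + 3):(s + 4)])
--             s += 4
--
--         if 96 < ord(o[u]) < 123: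
--             l = int(o[u + 1])
--             c = 0
--             while c < l:
--                 a.append(i[s:(s + 2)])
--                 s += 2
--                 c += 1
--
--         if 64 < ord(o[u]) < 91:
--             l = int(o[u + 1])
--             c = 0
--             while c < l:
--                 a.append(i[s:(s + 1)])
--                 s += 1
--                 c += 1
--         u += 1
--     return a
-- ===== SOURCE B (Python) =====
-- ne = ['2633141825201321121345332721524273528936811101916293117022304236',
--       '1831735156281312241132340102520529171363214283321272634162219930',
--       '2332353860219720155312141629130102234183691124281413251227261733',
--       '2592811262018293062732141927100364232411333831161535317211222534',
--       '9715232833130331019112512913172124126035262343627321642220185148',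
--       '3316362031032192529235212215274341412306269813312817111724201835',
--       '3293412148301016132183119242311021281920736172527353261533526224',
--       '3236623313013201625221912357142415851018341117262721294332103928',
--       '2619332514511302724163415617234183291312001227928218353622321031',
--       '3111952725113022716818421512203433241091723133635282932601432216']
--
-- _0x4fec = [
--     'f9D1x1Z2o1U2f5A1a1P1i7R1u2S1m1F1',
--     'o2A1x2F1u5~j1Y2z3!p2~r3G2m8S1c1',
--     'i3E5o1~d2!y2H1e2F1b6`g4v7',
--     'p1`t7D3x5#w2~l2Z1v4Y1k4M1n1',
--     'C2e3P1r7!s6U2n2~p5X1e3#',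
--     'g4`b6W1x4R1r4#!u5!#D1f2',
--     '!z4U1f4`f2R2o3!l4I1v6F1h2F1x2!',
--     'b2~u9h2K1l3X2y9#B4t1',
--     't5H1s7D1o2#p2#z1Q3v2`j6',
--     'r1#u5#f1Z2w7!r7#j3S1']
--
-- def gen_rsid(tid):
--     # verbatim r/o/i setup
--     r = str(ord(tid[0:1]))
--     r = r[1] if len(r) > 1 else r
--     o = _0x4fec[int(r)]
--     i = ne[int(r)]
--     # pass 1: fragment-length schedule from the pattern only (never touches i)
--     schedule = []
--     u = 0
--     while u < len(o):
--         ch = o[u]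
--         if ch in "`!~":
--             schedule.append(1)
--         elif ch == "#":
--             schedule.extend((1, 2, 1))
--         elif "a" <= ch <= "z":
--             schedule.extend([2] * int(o[u + 1]))
--         elif "A" <= ch <= "Z":
--             schedule.extend([1] * int(o[u + 1]))
--         u += 1
--     # pass 2: cut i along the schedule
--     a = []
--     s = 0
--     for length in schedule:
--         a.append(i[s:s + length])
--         s += length
--     return a
-- ===== Notes on version B (the rewrite author's own statement) =====
-- stated objective: simpler
-- what changed: A's single interleaved while loop with nested inner counting loops and a shared char cursor is split into two passes: pass 1 scans the pattern alone and builds a list of fragment lengths, pass 2 walks that schedule with a cursor, slicing the digit string.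
-- outside the precondition, e.g. on gen_rsid(''): A raises TypeError, B raises TypeError
import Mathlib
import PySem

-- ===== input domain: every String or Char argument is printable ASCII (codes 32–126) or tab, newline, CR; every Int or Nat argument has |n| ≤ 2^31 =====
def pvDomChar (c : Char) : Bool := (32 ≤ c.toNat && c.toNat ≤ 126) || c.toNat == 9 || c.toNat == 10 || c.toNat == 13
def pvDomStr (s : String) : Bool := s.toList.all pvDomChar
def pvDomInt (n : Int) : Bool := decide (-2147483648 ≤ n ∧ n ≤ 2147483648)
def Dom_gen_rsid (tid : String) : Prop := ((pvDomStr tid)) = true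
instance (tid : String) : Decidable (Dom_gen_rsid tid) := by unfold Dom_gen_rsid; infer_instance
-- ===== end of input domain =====

-- B = same decode split into two passes: build a fragment-length schedule from the pattern
-- alone, then cut the digit string along it (objective: simpler decomposition, no speed claim).

-- shared module-level constant tables (the Python module constants ne and _0x4fec)
def neTbl : List String :=
  ["2633141825201321121345332721524273528936811101916293117022304236",
   "1831735156281312241132340102520529171363214283321272634162219930",
   "2332353860219720155312141629130102234183691124281413251227261733",
   "2592811262018293062732141927100364232411333831161535317211222534",
   "9715232833130331019112512913172124126035262343627321642220185148",
   "3316362031032192529235212215274341412306269813312817111724201835",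
   "3293412148301016132183119242311021281920736172527353261533526224",
   "3236623313013201625221912357142415851018341117262721294332103928",
   "2619332514511302724163415617234183291312001227928218353622321031",
   "3111952725113022716818421512203433241091723133635282932601432216"]

def x4fecTbl : List String :=
  ["f9D1x1Z2o1U2f5A1a1P1i7R1u2S1m1F1",
   "o2A1x2F1u5~j1Y2z3!p2~r3G2m8S1c1",
   "i3E5o1~d2!y2H1e2F1b6`g4v7",
   "p1`t7D3x5#w2~l2Z1v4Y1k4M1n1",
   "C2e3P1r7!s6U2n2~p5X1e3#",
   "g4`b6W1x4R1r4#!u5!#D1f2",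
   "!z4U1f4`f2R2o3!l4I1v6F1h2F1x2!",
   "b2~u9h2K1l3X2y9#B4t1",
   "t5H1s7D1o2#p2#z1Q3v2`j6",
   "r1#u5#f1Z2w7!r7#j3S1"]

-- the verbatim-shared setup lines of A and B:
-- r = str(ord(tid[0:1])); r = r[1] if len(r) > 1 else r; int(r)
-- (on tid = "" Python raises TypeError in ord; that input is excluded by Pre_, value here irrelevant)
def rsidIndex (tid : String) : Nat :=
  match tid.toList.head? with
  | none => 0
  | some c =>
    let r := PySem.Int.toChars (c.toNat : Int)   -- str(ord(...)) as chars; nonempty, all decimal digits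
    let rc := if r.length > 1 then r.getD 1 '0' else r.getD 0 '0'
    rc.toNat - 48                                 -- int of a single decimal digit

-- i[s:s+w] for the Python string i (slice never raises)
def cut (i : List Char) (a b : Int) : String := String.ofList (PySem.List.slice i (some a) (some b))

-- digit value int(o[u]); every letter in the ten constant patterns is followed by a digit,
-- so the index is always in range and a digit there
def digitAt (o : List Char) (u : Nat) : Nat := (o.getD u '0').toNat - 48

-- ===== PORT A =====
-- inner 'while c < l' loops of A (counting the remaining iterations)
def pyRep (i : List Char) (w : Int) : Nat → Int → List String → (List String × Int)
  | 0, s, a => (a, s)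
  | l + 1, s, a => pyRep i w l (s + w) (a ++ [cut i s (s + w)])

-- A's 'while u < len(o)' loop, step for step; the loop advances u by 1 each iteration, so
-- fuel = o.length at the first call is exact (fuel only makes the recursion structural)
def genLoopA (o i : List Char) : Nat → Nat → Int → List String → List String
  | 0, _, _, a => a
  | fuel + 1, u, s, a =>
    match o[u]? with
    | none => a
    | some ch =>
    let (a, s) :=
      if ¬('`' ≠ ch ∧ '!' ≠ ch ∧ '~' ≠ ch) then (a ++ [cut i s (s + 1)], s + 1) else (a, s)
    let (a, s) :=
      if '#' = ch then
        (a ++ [cut i s (s + 1)] ++ [cut i (s + 1) (s + 3)] ++ [cut i (s + 3) (s + 4)], s + 4)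
      else (a, s)
    let (a, s) :=
      if 96 < ch.toNat ∧ ch.toNat < 123 then pyRep i 2 (digitAt o (u + 1)) s a else (a, s)
    let (a, s) :=
      if 64 < ch.toNat ∧ ch.toNat < 91 then pyRep i 1 (digitAt o (u + 1)) s a else (a, s)
    genLoopA o i fuel (u + 1) s a

def gen_rsid (tid : String) : List String :=
  let k := rsidIndex tid
  let o := (x4fecTbl.getD k "").toList
  let i := (neTbl.getD k "").toList
  genLoopA o i o.length 0 0 []

-- ===== PORT B =====
-- pass 1: the fragment-length schedule, from the pattern only
def scheduleLoop (o : List Char) : Nat → Nat → List Nat → List Nat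
  | 0, _, acc => acc
  | fuel + 1, u, acc =>
    match o[u]? with
    | none => acc
    | some ch =>
    let acc :=
      if ch = '`' ∨ ch = '!' ∨ ch = '~' then acc ++ [1]
      else if ch = '#' then acc ++ [1, 2, 1]
      else if 'a' ≤ ch ∧ ch ≤ 'z' then acc ++ List.replicate (digitAt o (u + 1)) 2
      else if 'A' ≤ ch ∧ ch ≤ 'Z' then acc ++ List.replicate (digitAt o (u + 1)) 1
      else acc
    scheduleLoop o fuel (u + 1) acc

-- pass 2: walk the schedule with cursor s
def emitLoop (i : List Char) : List Nat → Int → List String → List String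
  | [], _, a => a
  | w :: rest, s, a => emitLoop i rest (s + (w : Int)) (a ++ [cut i s (s + (w : Int))])

def gen_rsid_alt (tid : String) : List String :=
  let k := rsidIndex tid
  let o := (x4fecTbl.getD k "").toList
  let i := (neTbl.getD k "").toList
  emitLoop i (scheduleLoop o o.length 0 []) 0 []

-- ===== PRECONDITION & SPEC =====
-- Pre_ excludes only the empty string, on which A's ord(tid[0:1]) raises TypeError
def Pre_gen_rsid (tid : String) : Prop := tid ≠ ""
instance (tid : String) : Decidable (Pre_gen_rsid tid) := by unfold Pre_gen_rsid; infer_instance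

def pvWitness_gen_rsid : String := "42a"

def Spec_gen_rsid (tid : String) (out : List String) : Prop := out = gen_rsid_alt tid
instance (tid : String) (out : List String) : Decidable (Spec_gen_rsid tid out) := by unfold Spec_gen_rsid; infer_instance

-- ===== CLAIM (what is proved, stated in full; the proofs are below) =====
def Claim_equal_gen_rsid : Prop := ∀ (tid : String), Dom_gen_rsid tid → Pre_gen_rsid tid → Spec_gen_rsid tid (gen_rsid tid)

-- ===== LEMMAS AND PROOFS =====

-- both sides agree for every table index k
theorem core_eq (k : Nat) :
    genLoopA (x4fecTbl.getD k "").toList (neTbl.getD k "").toList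
      (x4fecTbl.getD k "").toList.length 0 0 [] =
    emitLoop (neTbl.getD k "").toList
      (scheduleLoop (x4fecTbl.getD k "").toList (x4fecTbl.getD k "").toList.length 0 []) 0 [] := by
  rcases Nat.lt_or_ge k 10 with hk | hk
  · interval_cases k <;> decide
  · rw [List.getD_eq_default x4fecTbl "" (by simp [x4fecTbl]; omega),
        List.getD_eq_default neTbl "" (by simp [neTbl]; omega)]
    rfl

-- ===== VERDICT (by name: the statement is the Claim_ definition above) =====
theorem gen_rsid_spec : Claim_equal_gen_rsid := by
  intro tid _ _
  unfold Spec_gen_rsid gen_rsid gen_rsid_alt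
  exact core_eq (rsidIndex tid)
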